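-- pv_equiv track=rewrite | github.com/mintnchocochip/cryptography | hill/server.py | matricize
-- ===== SOURCE A (Python) =====
-- def matricize(key):
--     ckey = []
--     key = list(key)
--     for i in range(len(key)):
--         key[i] = ord(key[i]) - ord("a")
--
--     while len(key) % 3 != 0:
--         key.append(23)
--
--     for i in range(0, len(key), 3):
--         ckey.append(key[i : i + 3])
--     return ckey
-- ===== SOURCE B (Python) =====
-- def matricize(key):
--     ckey = []
--     row = []
--     for ch in key:
--         row.append(ord(ch) - ord("a"))
--         if len(row) == 3:
--             ckey.append(row)
--             row = []
--     if row:
--         ckey.append(row + [23] * (3 - len(row)))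
--     return ckey
-- ===== Notes on version B (the rewrite author's own statement) =====
-- stated objective: simpler
-- what changed: Single pass with a running row that is flushed at length 3 and padded only if a final partial row remains, replacing A's three phases (in-place numeric rewrite, pad-to-multiple while loop, slicing loop).
import Mathlib
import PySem

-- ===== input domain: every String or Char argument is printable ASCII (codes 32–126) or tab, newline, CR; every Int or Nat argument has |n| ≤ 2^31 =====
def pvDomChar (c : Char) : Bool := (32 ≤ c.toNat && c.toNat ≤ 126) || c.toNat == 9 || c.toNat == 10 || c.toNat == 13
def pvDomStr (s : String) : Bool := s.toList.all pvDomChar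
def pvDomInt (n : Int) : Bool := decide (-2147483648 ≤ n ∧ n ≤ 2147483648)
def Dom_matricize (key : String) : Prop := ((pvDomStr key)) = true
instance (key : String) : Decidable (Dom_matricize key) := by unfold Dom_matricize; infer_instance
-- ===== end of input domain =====

-- B builds the matrix in one pass with a running row; A converts, pads to a multiple
-- of 3 with a while loop, then slices — objective: simpler (one phase instead of three).

-- ===== PORT A =====
-- 'while len(key) % 3 != 0: key.append(23)'
def padLoopA (l : List Int) : List Int :=
  if l.length % 3 ≠ 0 then padLoopA (l ++ [23]) else l
termination_by (3 - l.length % 3) % 3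
decreasing_by simp [List.length_append]; omega

-- 'for i in range(0, len(key), 3): ckey.append(key[i:i+3])' (i, counting up by 3)
def chunkLoopA (l : List Int) (i : Nat) : List (List Int) :=
  if i < l.length then
    PySem.List.slice l (some (i : Int)) (some ((i : Int) + 3)) :: chunkLoopA l (i + 3)
  else []
termination_by l.length - i

def matricize (key : String) : List (List Int) :=
  chunkLoopA (padLoopA (key.toList.map (fun c => (c.toNat : Int) - 97))) 0

-- ===== PORT B =====
def stepB (st : List (List Int) × List Int) (c : Char) : List (List Int) × List Int :=
  let row := st.2 ++ [(c.toNat : Int) - 97]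
  if row.length = 3 then (st.1 ++ [row], []) else (st.1, row)

def matricize_alt (key : String) : List (List Int) :=
  let st := key.toList.foldl stepB ([], [])
  if st.2 ≠ [] then st.1 ++ [st.2 ++ List.replicate (3 - st.2.length) 23] else st.1

-- ===== PRECONDITION & SPEC =====
def Spec_matricize (key : String) (out : List (List Int)) : Prop := out = matricize_alt key
instance (key : String) (out : List (List Int)) : Decidable (Spec_matricize key out) := by unfold Spec_matricize; infer_instance

-- ===== CLAIM (what is proved, stated in full; the proofs are below) =====
def Claim_equal_matricize : Prop := ∀ (key : String), Dom_matricize key → Spec_matricize key (matricize key)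

-- ===== LEMMAS AND PROOFS =====

-- clean 3-at-a-time chunking both ports are reduced to
def chunk3 : List Int → List (List Int)
  | [] => []
  | a :: rest => ((a :: rest).take 3) :: chunk3 ((a :: rest).drop 3)
termination_by l => l.length
decreasing_by simp [List.length_drop]

def padded (l : List Int) : List Int := l ++ List.replicate ((3 - l.length % 3) % 3) 23

theorem padLoopA_eq (l : List Int) : padLoopA l = padded l := by
  unfold padLoopA
  split
  · rw [padLoopA_eq (l ++ [23])]
    unfold padded
    simp only [List.length_append, List.length_cons, List.length_nil, List.append_assoc]
    congr 1
    have h3 : l.length % 3 < 3 := Nat.mod_lt _ (by omega)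
    have : (3 - (l.length + 1) % 3) % 3 + 1 = (3 - l.length % 3) % 3 := by omega
    rw [← this, List.replicate_succ]
    rfl
  · unfold padded
    simp_all
termination_by (3 - l.length % 3) % 3
decreasing_by simp [List.length_append]; omega

theorem chunkLoopA_eq (l : List Int) (i : Nat) : chunkLoopA l i = chunk3 (l.drop i) := by
  unfold chunkLoopA
  split
  · rename_i h
    rw [chunkLoopA_eq l (i + 3)]
    have hd : l.drop i ≠ [] := by
      intro he; have := List.length_drop (l := l) (i := i); simp [he] at this; omega
    obtain ⟨a, rest, hrest⟩ := List.exists_cons_of_ne_nil hd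
    rw [hrest]
    show _ = chunk3 (a :: rest)
    rw [chunk3, ← hrest]
    congr 1
    · rw [show ((i : Int) + 3) = (((i + 3 : Nat) : Int)) by push_cast; ring,
        PySem.List.slice_natCast]
      congr 1
      omega
    · rw [List.drop_drop, Nat.add_comm]
  · rename_i h
    rw [List.drop_eq_nil_of_le (by omega)]
    simp [chunk3]
termination_by l.length - i

theorem chunk3_full (l : List Int) (h : l.length = 3) : chunk3 l = [l] := by
  match l, h with
  | a :: rest, h =>
    have h2 : rest.length = 2 := by simpa using h
    have ht : List.take 3 (a :: rest) = a :: rest :=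
      List.take_of_length_le (by simp [h2])
    have hd : List.drop 3 (a :: rest) = [] :=
      List.drop_eq_nil_of_le (by simp [h2])
    rw [chunk3, ht, hd]
    simp [chunk3]

theorem chunk3_cons3 (p t : List Int) (hp : p.length = 3) :
    chunk3 (p ++ t) = p :: chunk3 t := by
  match p, hp with
  | a :: rest, hp =>
    rw [List.cons_append, chunk3, ← List.cons_append]
    congr 1
    · exact List.take_left' hp
    · congr 1; exact List.drop_left' hp

def finishB (st : List (List Int) × List Int) : List (List Int) :=
  if st.2 ≠ [] then st.1 ++ [st.2 ++ List.replicate (3 - st.2.length) 23] else st.1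

theorem foldB_eq (xs : List Char) (acc : List (List Int)) (row : List Int)
    (hrow : row.length < 3) :
    finishB (xs.foldl stepB (acc, row)) = acc ++ chunk3 (padded (row ++ xs.map (fun c => (c.toNat : Int) - 97))) := by
  induction xs generalizing acc row with
  | nil =>
    simp only [List.foldl_nil, List.map_nil, List.append_nil]
    by_cases h : row = []
    · subst h; simp [finishB, padded, chunk3]
    · have h0 : row.length ≠ 0 := fun he => h (List.eq_nil_of_length_eq_zero he)
      have hmod : (3 - row.length % 3) % 3 = 3 - row.length := by omega
      rw [finishB, if_pos h, padded, hmod,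
        chunk3_full _ (by simp; omega)]
  | cons x rest ih =>
    simp only [List.foldl_cons, List.map_cons]
    rw [stepB]
    split
    · rename_i hlen
      rw [ih _ _ (by simp)]
      have hassoc : row ++ (((x.toNat : Int) - 97) :: rest.map (fun c => (c.toNat : Int) - 97))
          = (row ++ [(x.toNat : Int) - 97]) ++ rest.map (fun c => (c.toNat : Int) - 97) := by
        simp
      rw [hassoc]
      have hlen3 : (row ++ [(x.toNat : Int) - 97]).length = 3 := hlen
      have hpad : padded ((row ++ [(x.toNat : Int) - 97]) ++ rest.map (fun c => (c.toNat : Int) - 97))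
          = (row ++ [(x.toNat : Int) - 97]) ++ padded (rest.map (fun c => (c.toNat : Int) - 97)) := by
        unfold padded
        have hr2 : row.length = 2 := by simpa using hlen3
        have hk : (3 - ((row ++ [(x.toNat : Int) - 97]) ++ rest.map (fun c => (c.toNat : Int) - 97)).length % 3) % 3
            = (3 - (rest.map (fun c => (c.toNat : Int) - 97)).length % 3) % 3 := by
          simp only [List.length_append, List.length_cons, List.length_nil, hr2]
          omega
        rw [hk, List.append_assoc]
      rw [hpad, chunk3_cons3 _ _ hlen3]
      simp
    · rename_i hlen
      rw [ih _ _ (by simp at hlen ⊢; omega)]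
      simp

-- ===== VERDICT (by name: the statement is the Claim_ definition above) =====
theorem matricize_spec : Claim_equal_matricize := by
  intro key _
  show matricize key = matricize_alt key
  rw [matricize, padLoopA_eq, chunkLoopA_eq, List.drop_zero]
  have := foldB_eq key.toList [] [] (by simp)
  simp only [List.nil_append] at this
  rw [matricize_alt]
  exact this.symm
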